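-- pv_equiv track=rewrite | github.com/e2tovar/Consciences | src/examples/Dialog/Skip_Gram_Complete_Problem.py | get_words_set
-- ===== SOURCE A (Python) =====
-- def get_words_set(processes_sentences):
--     """
--     A partir de frases preprocesadas, obtiene el conjunto de palabras (sin repetición) de las que se compone
--     """
--     words = []
--     to_delete_marks = [",", ".", ":", ";", "!", "¡", "?", "¿"]
--     corpus = [item for sublist in processes_sentences for item in sublist]
--     for word in corpus:
--         if word not in to_delete_marks:
--             words.append(word)
--     words = list(set(words))  # Removemos palabras repetidas
--     #pt("words",words)
--     return words
-- ===== SOURCE B (Python) =====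
-- MARKS = (",", ".", ":", ";", "!", "\u00a1", "?", "\u00bf")
--
--
-- def _words_of(sentences):
--     # Divide and conquer: a single sentence yields its filtered word set,
--     # longer ranges are split in half and the two halves' sets are unioned.
--     if len(sentences) == 1:
--         return {w for w in sentences[0] if w not in MARKS}
--     mid = len(sentences) // 2
--     return _words_of(sentences[:mid]) | _words_of(sentences[mid:])
--
--
-- def get_words_set(processes_sentences):
--     if not processes_sentences:
--         return []
--     return list(_words_of(processes_sentences))
-- ===== Notes on version B (the rewrite author's own statement) =====
-- stated objective: alternative
-- what changed: B computes the word set by divide and conquer: each single sentence yields its punctuation-filtered word set directly and longer sentence ranges are split in half and merged with set union, instead of A's staged flatten / per-word filter loop / list(set(...)) dedup pipeline.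
import Mathlib
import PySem

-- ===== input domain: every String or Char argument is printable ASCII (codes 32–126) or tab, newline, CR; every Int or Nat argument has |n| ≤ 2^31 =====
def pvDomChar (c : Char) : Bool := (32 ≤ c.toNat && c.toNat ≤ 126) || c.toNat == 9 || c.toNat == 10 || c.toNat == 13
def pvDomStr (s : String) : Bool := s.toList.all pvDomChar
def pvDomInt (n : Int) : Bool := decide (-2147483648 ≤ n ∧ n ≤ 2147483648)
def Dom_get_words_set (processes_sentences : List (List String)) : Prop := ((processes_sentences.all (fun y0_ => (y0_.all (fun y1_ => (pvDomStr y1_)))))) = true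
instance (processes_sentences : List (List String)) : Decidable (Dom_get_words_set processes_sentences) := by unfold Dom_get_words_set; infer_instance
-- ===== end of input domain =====

-- B replaces A's staged flatten / per-word filter loop / list(set(...)) dedup pipeline by a
-- divide-and-conquer union of per-sentence filtered word sets (alternative decomposition;
-- Python's list(set(...)) hash order is not modelled — outputs are compared as finite sets).

-- ===== PORT A =====
def get_words_set (processes_sentences : List (List String)) : List String :=
  let words : List String := []
  let to_delete_marks : List String := [",", ".", ":", ";", "!", "¡", "?", "¿"]
  let corpus : List String := processes_sentences.flatMap (fun sublist => sublist)
  let words := corpus.foldl (fun words word =>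
    if ¬ (word ∈ to_delete_marks) then words ++ [word] else words) words
  PySem.Set.ofList words

-- ===== PORT B =====
-- B-side helper: the MARKS tuple of Source B
def pvMarks : List String := [",", ".", ":", ";", "!", "¡", "?", "¿"]

-- B-side helper: _words_of of Source B (only called on nonempty ranges)
def pvWordsOf : List (List String) → PySem.Set String
  | [] => PySem.Set.empty  -- unreachable from get_words_set_alt (Python never calls _words_of on [])
  | [s] => PySem.Set.ofList (s.filter (fun w => decide (¬ w ∈ pvMarks)))
  | s₁ :: s₂ :: rest =>
      let sents := s₁ :: s₂ :: rest
      let mid := sents.length / 2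
      PySem.Set.union (pvWordsOf (sents.take mid)) (pvWordsOf (sents.drop mid))
  termination_by sents => sents.length
  decreasing_by
    · simp; omega
    · simp; omega

def get_words_set_alt (processes_sentences : List (List String)) : List String :=
  if processes_sentences.isEmpty then []
  else pvWordsOf processes_sentences

-- ===== PRECONDITION & SPEC =====
def Spec_get_words_set (processes_sentences : List (List String)) (out : List String) : Prop := out = get_words_set_alt processes_sentences
instance (processes_sentences : List (List String)) (out : List String) : Decidable (Spec_get_words_set processes_sentences out) := by unfold Spec_get_words_set; infer_instance

-- ===== CLAIM (what is proved, stated in full; the proofs are below) =====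
def Claim_equal_get_words_set : Prop := ∀ (processes_sentences : List (List String)), Dom_get_words_set processes_sentences → Spec_get_words_set processes_sentences (get_words_set processes_sentences)

-- ===== LEMMAS AND PROOFS =====

-- updating with set(ys) is the same as updating with ys
theorem update_ofList (s ys : List String) :
    PySem.Set.update s (PySem.Set.ofList ys) = PySem.Set.update s ys := by
  rw [PySem.Set.update_eq_append_filter, PySem.Set.update_eq_append_filter,
    PySem.Set.ofList_ofList]

-- union of two ofList sets is the set of the concatenation
theorem union_ofList (xs ys : List String) :
    PySem.Set.union (PySem.Set.ofList xs) (PySem.Set.ofList ys)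
      = PySem.Set.ofList (xs ++ ys) := by
  rw [PySem.Set.ofList_append, ← update_ofList]
  rfl

-- the divide-and-conquer helper computes set(filter(flatten ·))
theorem pvWordsOf_eq_ofList (sents : List (List String)) :
    pvWordsOf sents
      = PySem.Set.ofList ((sents.flatMap (fun s => s)).filter (fun w => decide (¬ w ∈ pvMarks))) := by
  induction sents using pvWordsOf.induct with
  | case1 => simp [pvWordsOf]
  | case2 s => simp [pvWordsOf]
  | case3 s₁ s₂ rest sents mid iha ihb =>
    rw [pvWordsOf, iha, ihb, union_ofList, ← List.filter_append, ← List.flatMap_append,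
      List.take_append_drop]

-- ===== VERDICT (by name: the statement is the Claim_ definition above) =====
theorem get_words_set_spec : Claim_equal_get_words_set := by
  intro ps _
  unfold Spec_get_words_set get_words_set get_words_set_alt
  simp only
  rw [PySem.List.foldl_append_ite_eq_filter]
  simp only [List.nil_append]
  by_cases h : ps.isEmpty
  · rw [if_pos h]
    rw [List.isEmpty_iff] at h
    subst h; rfl
  · rw [if_neg h, pvWordsOf_eq_ofList]
    simp [pvMarks]
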